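-- pv_equiv track=rewrite | github.com/Khoi12345842/o-an-quan | game.py | get_position_from_click
-- ===== SOURCE A (Python) =====
-- def get_position_from_click(pos):
--     x, y = pos
--     if 300 <= y <= 380:
--         for i in range(5):
--             if 150 + i * 100 <= x <= 230 + i * 100:
--                 return i
--     if 200 <= y <= 280:
--         for i in range(5):
--             if 150 + i * 100 <= x <= 230 + i * 100:
--                 return i + 6
--     return -1
-- ===== SOURCE B (Python) =====
-- def get_position_from_click(pos):
--     x, y = pos
--     i, r = divmod(x - 150, 100)
--     hit = 0 <= i < 5 and r <= 80
--     if 300 <= y <= 380: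
--         return i if hit else -1
--     if 200 <= y <= 280:
--         return i + 6 if hit else -1
--     return -1
-- ===== Notes on version B (the rewrite author's own statement) =====
-- stated objective: simpler
-- what changed: Replaces the two 5-iteration scans over candidate cells by a single divmod computation that finds the cell index and in-cell offset directly.
import Mathlib
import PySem

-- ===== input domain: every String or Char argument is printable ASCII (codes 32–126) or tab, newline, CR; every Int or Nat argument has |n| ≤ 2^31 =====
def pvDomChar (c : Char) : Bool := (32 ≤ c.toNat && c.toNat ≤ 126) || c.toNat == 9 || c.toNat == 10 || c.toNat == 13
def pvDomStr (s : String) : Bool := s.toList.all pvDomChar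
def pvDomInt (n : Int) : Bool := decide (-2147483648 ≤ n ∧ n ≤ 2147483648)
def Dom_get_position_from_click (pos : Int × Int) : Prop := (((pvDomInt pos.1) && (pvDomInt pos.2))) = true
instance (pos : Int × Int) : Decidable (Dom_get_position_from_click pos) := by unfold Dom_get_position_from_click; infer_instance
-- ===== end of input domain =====

-- B replaces A's two fixed 5-iteration scans by a single divmod computing the cell index directly (simpler).


-- ===== PORT A =====
-- the `for i in range(5): if … : return i` loop, as a first-match scan over the range list
def pvScanA (x : Int) : List Int → Option Int
  | [] => none
  | i :: rest =>
      if 150 + i * 100 ≤ x ∧ x ≤ 230 + i * 100 then some i else pvScanA x rest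

def get_position_from_click (pos : Int × Int) : Int :=
  let x := pos.1
  let y := pos.2
  match (if 300 ≤ y ∧ y ≤ 380 then pvScanA x (PySem.List.pyRange 0 5 1) else none) with
  | some i => i
  | none =>
    match (if 200 ≤ y ∧ y ≤ 280 then pvScanA x (PySem.List.pyRange 0 5 1) else none) with
    | some i => i + 6
    | none => -1

-- ===== PORT B =====
def get_position_from_click_alt (pos : Int × Int) : Int :=
  let x := pos.1
  let y := pos.2
  let i := PySem.Int.floordiv (x - 150) 100
  let r := PySem.Int.mod (x - 150) 100
  let hit := 0 ≤ i ∧ i < 5 ∧ r ≤ 80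
  if 300 ≤ y ∧ y ≤ 380 then (if hit then i else -1)
  else if 200 ≤ y ∧ y ≤ 280 then (if hit then i + 6 else -1)
  else -1

-- ===== PRECONDITION & SPEC =====
def Spec_get_position_from_click (pos : Int × Int) (out : Int) : Prop := out = get_position_from_click_alt pos
instance (pos : Int × Int) (out : Int) : Decidable (Spec_get_position_from_click pos out) := by unfold Spec_get_position_from_click; infer_instance

-- ===== CLAIM (what is proved, stated in full; the proofs are below) =====
def Claim_equal_get_position_from_click : Prop := ∀ (pos : Int × Int), Dom_get_position_from_click pos → Spec_get_position_from_click pos (get_position_from_click pos)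

-- ===== LEMMAS AND PROOFS =====
-- the scan over [0,1,2,3,4] agrees with the divmod formulation of B
theorem pvScanA_eq (x : Int) :
    pvScanA x [0, 1, 2, 3, 4] =
      (if 0 ≤ PySem.Int.floordiv (x - 150) 100 ∧ PySem.Int.floordiv (x - 150) 100 < 5 ∧
          PySem.Int.mod (x - 150) 100 ≤ 80
       then some (PySem.Int.floordiv (x - 150) 100) else none) := by
  have hd : PySem.Int.floordiv (x - 150) 100 = (x - 150) / 100 :=
    PySem.Int.floordiv_eq_ediv_of_pos (by norm_num)
  have hm : PySem.Int.mod (x - 150) 100 = (x - 150) % 100 :=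
    PySem.Int.mod_eq_emod_of_pos (by norm_num)
  simp only [pvScanA, hd, hm]
  split_ifs <;> first | rfl | (exfalso; omega) | (congr 1; omega)

-- ===== VERDICT (by name: the statement is the Claim_ definition above) =====
theorem get_position_from_click_spec : Claim_equal_get_position_from_click := by
  intro pos _
  unfold Spec_get_position_from_click get_position_from_click get_position_from_click_alt
  have hr : PySem.List.pyRange 0 5 1 = [0, 1, 2, 3, 4] := by decide
  simp only [hr, pvScanA_eq]
  have hband : ¬ ((300 ≤ pos.2 ∧ pos.2 ≤ 380) ∧ (200 ≤ pos.2 ∧ pos.2 ≤ 280)) := by omega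
  split_ifs <;> simp_all
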